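-- pv_equiv track=rewrite | github.com/VoXc2/dealix | scripts/audit_orphan_endpoints.py | _path_matches_dynamic
-- ===== SOURCE A (Python) =====
-- def _path_matches_dynamic(ref: str, pattern: str) -> bool:
--     """True if ref matches pattern where pattern may include ``{param}`` segments."""
--     r_parts = [p for p in ref.strip("/").split("/") if p]
--     p_parts = [p for p in pattern.strip("/").split("/") if p]
--     if len(r_parts) != len(p_parts):
--         return False
--     for rp, pp in zip(r_parts, p_parts):
--         if pp.startswith("{") and pp.endswith("}"):
--             continue
--         if rp != pp:
--             return False
--     return True
-- ===== SOURCE B (Python) =====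
-- def _path_matches_dynamic(ref: str, pattern: str) -> bool:
--     """True if ref matches pattern where pattern may include ``{param}`` segments."""
--     def segs(s):
--         return [p for p in s.strip("/").split("/") if p]
--
--     def match(rs, ps):
--         if not ps:
--             return not rs
--         if not rs:
--             return False
--         pp = ps[0]
--         return (pp.startswith("{") and pp.endswith("}") or rs[0] == pp) and match(rs[1:], ps[1:])
--
--     return match(segs(ref), segs(pattern))
-- ===== Notes on version B (the rewrite author's own statement) =====
-- stated objective: idiomatic
-- what changed: Replaces the explicit length check plus zip loop with a single structural recursion over the two segment lists that consumes one segment from each per step and handles unequal lengths by running off either list.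
import Mathlib
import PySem

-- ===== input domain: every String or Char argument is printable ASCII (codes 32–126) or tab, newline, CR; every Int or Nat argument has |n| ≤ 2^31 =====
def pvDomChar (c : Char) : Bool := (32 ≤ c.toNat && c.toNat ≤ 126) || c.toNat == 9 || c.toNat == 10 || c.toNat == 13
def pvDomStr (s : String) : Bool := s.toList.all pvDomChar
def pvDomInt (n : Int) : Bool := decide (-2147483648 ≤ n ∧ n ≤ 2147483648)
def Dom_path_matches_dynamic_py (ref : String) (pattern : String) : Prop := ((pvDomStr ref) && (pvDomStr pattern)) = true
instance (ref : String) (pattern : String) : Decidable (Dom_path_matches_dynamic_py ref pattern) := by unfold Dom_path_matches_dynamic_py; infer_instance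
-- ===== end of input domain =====

-- B replaces A's length check + zip loop with one structural recursion over the two segment lists (idiomatic; same cost).
-- ===== PORT A =====
def pvSegsA (s : String) : List String :=
  -- split? returns some here (sep "/" ≠ "")
  (((PySem.Str.split? (PySem.Str.stripChars s "/") "/").getD []).filter (fun p => p ≠ ""))

def pvLoopA : List (String × String) → Bool
  | [] => true
  | (rp, pp) :: rest =>
      if PySem.Str.startswith pp "{" && PySem.Str.endswith pp "}" then pvLoopA rest
      else if rp ≠ pp then false
      else pvLoopA rest

def path_matches_dynamic_py (ref : String) (pattern : String) : Bool :=
  let r_parts := pvSegsA ref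
  let p_parts := pvSegsA pattern
  if r_parts.length ≠ p_parts.length then false
  else pvLoopA (r_parts.zip p_parts)

-- ===== PORT B =====
def pvSegsB (s : String) : List String :=
  -- split? returns some here (sep "/" ≠ "")
  (((PySem.Str.split? (PySem.Str.stripChars s "/") "/").getD []).filter (fun p => p ≠ ""))

def pvMatchB : List String → List String → Bool
  | rs, [] => rs.isEmpty
  | [], _ :: _ => false
  | rp :: rs, pp :: ps =>
      ((PySem.Str.startswith pp "{" && PySem.Str.endswith pp "}") || rp == pp) && pvMatchB rs ps

def path_matches_dynamic_py_alt (ref : String) (pattern : String) : Bool :=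
  pvMatchB (pvSegsB ref) (pvSegsB pattern)

-- ===== PRECONDITION & SPEC =====
def Spec_path_matches_dynamic_py (ref : String) (pattern : String) (out : Bool) : Prop := out = path_matches_dynamic_py_alt ref pattern
instance (ref : String) (pattern : String) (out : Bool) : Decidable (Spec_path_matches_dynamic_py ref pattern out) := by unfold Spec_path_matches_dynamic_py; infer_instance

-- ===== CLAIM (what is proved, stated in full; the proofs are below) =====
def Claim_equal_path_matches_dynamic_py : Prop := ∀ (ref : String) (pattern : String), Dom_path_matches_dynamic_py ref pattern → Spec_path_matches_dynamic_py ref pattern (path_matches_dynamic_py ref pattern)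

-- ===== LEMMAS AND PROOFS =====

-- ===== VERDICT (by name: the statement is the Claim_ definition above) =====
lemma pvMatchB_eq (rs ps : List String) :
    pvMatchB rs ps = ((rs.length == ps.length) && pvLoopA (rs.zip ps)) := by
  induction ps generalizing rs with
  | nil => cases rs <;> simp [pvMatchB, pvLoopA]
  | cons pp ps ih =>
    cases rs with
    | nil => simp [pvMatchB]
    | cons rp rs =>
      simp only [pvMatchB, pvLoopA, List.zip_cons_cons, List.length_cons, ih]
      split_ifs with h1 h2
      · rw [Bool.and_eq_true] at h1
        simp_all
      · have hB : (PySem.Str.startswith pp "{" && PySem.Str.endswith pp "}") = false :=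
          Bool.eq_false_iff.mpr h1
        rw [Bool.and_eq_false_iff] at hB
        simp_all
      · have hr : rp = pp := not_not.mp h2
        simp [hr]

theorem path_matches_dynamic_py_spec : Claim_equal_path_matches_dynamic_py := by
  intro ref pattern _
  unfold Spec_path_matches_dynamic_py path_matches_dynamic_py path_matches_dynamic_py_alt
  show (if (pvSegsA ref).length ≠ (pvSegsA pattern).length then false
        else pvLoopA ((pvSegsA ref).zip (pvSegsA pattern))) = pvMatchB (pvSegsB ref) (pvSegsB pattern)
  rw [show pvSegsB = pvSegsA from rfl, pvMatchB_eq]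
  by_cases h : (pvSegsA ref).length = (pvSegsA pattern).length <;> simp [h]
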